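-- pv_equiv track=rewrite | github.com/panpan-wu/asre2e | asre2e/ctc.py | ctc_merge_duplicates_and_remove_blanks
-- ===== SOURCE A (Python) =====
-- from typing import List
--
-- def ctc_merge_duplicates_and_remove_blanks(
--     char_ids: List[int],
--     blank_id: int = 0,
-- ) -> List[int]:
--     res = []
--     prev_char_id = blank_id
--     for char_id in char_ids:
--         if char_id != blank_id and char_id != prev_char_id:
--             res.append(char_id)
--         prev_char_id = char_id
--     return res
-- ===== SOURCE B (Python) =====
-- from itertools import groupby
-- from typing import List
--
-- def ctc_merge_duplicates_and_remove_blanks(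
--     char_ids: List[int],
--     blank_id: int = 0,
-- ) -> List[int]:
--     collapsed = [k for k, _ in groupby(char_ids)]
--     return [c for c in collapsed if c != blank_id]
-- ===== Notes on version B (the rewrite author's own statement) =====
-- stated objective: idiomatic
-- what changed: Replaces the single stateful loop tracking prev_char_id by a two-stage pipeline: itertools.groupby collapses consecutive duplicate runs, then a comprehension drops blank_id.
import Mathlib
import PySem

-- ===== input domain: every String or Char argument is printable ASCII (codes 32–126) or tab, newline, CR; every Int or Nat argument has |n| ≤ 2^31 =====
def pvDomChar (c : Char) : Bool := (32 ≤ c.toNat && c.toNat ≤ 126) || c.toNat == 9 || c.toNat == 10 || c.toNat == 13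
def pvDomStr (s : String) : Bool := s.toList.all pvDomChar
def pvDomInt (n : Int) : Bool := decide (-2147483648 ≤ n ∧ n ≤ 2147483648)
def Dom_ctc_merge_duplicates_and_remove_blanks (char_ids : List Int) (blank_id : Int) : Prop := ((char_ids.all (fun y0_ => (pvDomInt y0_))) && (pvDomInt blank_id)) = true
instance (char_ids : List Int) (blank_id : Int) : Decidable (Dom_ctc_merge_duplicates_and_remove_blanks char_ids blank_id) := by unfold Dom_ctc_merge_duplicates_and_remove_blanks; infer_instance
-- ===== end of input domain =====

-- B replaces A's single stateful loop (prev_char_id) by two passes: collapse consecutive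
-- duplicate runs (groupby), then filter out blank_id; objective: idiomatic.


-- ===== PORT A =====
-- literal fold over the state (res, prev_char_id), appending as Python does
def ctc_merge_duplicates_and_remove_blanks (char_ids : List Int) (blank_id : Int) : List Int :=
  (char_ids.foldl
    (fun (st : List Int × Int) char_id =>
      (if char_id ≠ blank_id ∧ char_id ≠ st.2 then st.1 ++ [char_id] else st.1, char_id))
    ([], blank_id)).1

-- ===== PORT B =====
-- itertools.groupby keys = collapse consecutive duplicate runs
def pvCollapse : List Int → List Int
  | [] => []
  | [c] => [c]
  | c :: c' :: cs => if c = c' then pvCollapse (c' :: cs) else c :: pvCollapse (c' :: cs)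

def ctc_merge_duplicates_and_remove_blanks_alt (char_ids : List Int) (blank_id : Int) : List Int :=
  (pvCollapse char_ids).filter (fun c => c != blank_id)

-- ===== PRECONDITION & SPEC =====
def Spec_ctc_merge_duplicates_and_remove_blanks (char_ids : List Int) (blank_id : Int) (out : List Int) : Prop := out = ctc_merge_duplicates_and_remove_blanks_alt char_ids blank_id
instance (char_ids : List Int) (blank_id : Int) (out : List Int) : Decidable (Spec_ctc_merge_duplicates_and_remove_blanks char_ids blank_id out) := by unfold Spec_ctc_merge_duplicates_and_remove_blanks; infer_instance

-- ===== CLAIM (what is proved, stated in full; the proofs are below) =====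
def Claim_equal_ctc_merge_duplicates_and_remove_blanks : Prop := ∀ (char_ids : List Int) (blank_id : Int), Dom_ctc_merge_duplicates_and_remove_blanks char_ids blank_id → Spec_ctc_merge_duplicates_and_remove_blanks char_ids blank_id (ctc_merge_duplicates_and_remove_blanks char_ids blank_id)

-- ===== LEMMAS AND PROOFS =====

-- A's loop, rewritten with the emitted element consed in front (for the induction)
def pvALoop (blank : Int) : List Int → Int → List Int
  | [], _ => []
  | c :: cs, prev =>
    if c ≠ blank ∧ c ≠ prev then c :: pvALoop blank cs c else pvALoop blank cs c

theorem pvFoldl_eq_aLoop (blank : Int) (l : List Int) (acc : List Int) (prev : Int) :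
    (l.foldl
      (fun (st : List Int × Int) c =>
        (if c ≠ blank ∧ c ≠ st.2 then st.1 ++ [c] else st.1, c)) (acc, prev)).1
    = acc ++ pvALoop blank l prev := by
  induction l generalizing acc prev with
  | nil => simp [pvALoop]
  | cons c cs ih =>
    simp only [List.foldl_cons, pvALoop]
    by_cases h : c ≠ blank ∧ c ≠ prev <;> simp [h, ih, List.append_assoc]

theorem pvCollapse_cons (c : Int) (cs : List Int) :
    pvCollapse (c :: cs) = c :: pvCollapse (cs.dropWhile (· == c)) := by
  induction cs generalizing c with
  | nil => simp [pvCollapse]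
  | cons d ds ih =>
    by_cases h : c = d
    · subst h
      simp only [pvCollapse, List.dropWhile]
      simpa using ih c
    · have hdc : (d == c) = false := by simpa using fun he => h he.symm
      simp [pvCollapse, h, List.dropWhile, hdc]

theorem pvALoop_eq (blank : Int) (l : List Int) (prev : Int) :
    pvALoop blank l prev
      = (pvCollapse (l.dropWhile (· == prev))).filter (fun c => c != blank) := by
  induction l generalizing prev with
  | nil => simp [pvALoop, pvCollapse]
  | cons c cs ih =>
    by_cases h : c = prev
    · subst h
      have : pvALoop blank (c :: cs) c = pvALoop blank cs c := by
        simp [pvALoop]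
      rw [this, ih c]
      simp [List.dropWhile]
    · have hcp : (c == prev) = false := by simp [h]
      have hdw : (c :: cs).dropWhile (· == prev) = c :: cs := by
        simp [List.dropWhile, hcp]
      rw [hdw, pvCollapse_cons, List.filter_cons]
      by_cases hb : c = blank
      · subst hb
        simp [pvALoop, h, ih]
      · simp [pvALoop, h, hb, ih]

-- ===== VERDICT (by name: the statement is the Claim_ definition above) =====
theorem ctc_merge_duplicates_and_remove_blanks_spec : Claim_equal_ctc_merge_duplicates_and_remove_blanks := by
  intro char_ids blank_id _
  show _ = _
  rw [ctc_merge_duplicates_and_remove_blanks, pvFoldl_eq_aLoop, List.nil_append,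
    pvALoop_eq, ctc_merge_duplicates_and_remove_blanks_alt]
  cases char_ids with
  | nil => simp
  | cons c cs =>
    by_cases h : c = blank_id
    · subst h
      rw [pvCollapse_cons]
      simp [List.dropWhile]
    · have hcb : (c == blank_id) = false := by simp [h]
      simp [List.dropWhile, hcb]
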